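-- pv_equiv track=rewrite | github.com/Darshan-AS/Cracking-The-Coding-Interview | 8. Recursion and Dynamic Programming/8_Permutation_With_Duplicates.py | permutations_with_duplicates
-- ===== SOURCE A (Python) =====
-- from collections import Counter
--
-- def permutations_with_duplicates(s):
--     def permutation_helper(s_counter):
--
--         if not s_counter - Counter():
--             return {''}
--
--         permutations = set()
--         # Try remaining letters for next char, and generate remaining permutations.
--         for char in s_counter.keys():
--             if not s_counter[char]:
--                 continue
--
--             next_counter = s_counter.copy()
--             next_counter[char] -= 1
--             for permutation in permutation_helper(next_counter):
--                 permutations.add(char + permutation)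
--
--         return permutations
--
--     return permutation_helper(Counter(s))
-- ===== SOURCE B (Python) =====
-- from collections import Counter
--
-- def permutations_with_duplicates(s):
--     # Memoized dynamic programming over remaining-count tuples: each distinct sub-multiset's
--     # suffix-permutation set is computed once and reused, instead of A's recomputation of the
--     # same subproblem along every branch of the recursion tree.
--     counts = Counter(s)
--     chars = list(counts)
--     memo = {}
--
--     def suffixes(key):
--         if key in memo:
--             return memo[key]
--         perms = set()
--         if sum(key) == 0:
--             perms.add('')
--         else:
--             for i, c in enumerate(chars):
--                 if key[i]:
--                     rest = key[:i] + (key[i] - 1,) + key[i + 1:]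
--                     for p in suffixes(rest):
--                         perms.add(c + p)
--         memo[key] = perms
--         return perms
--
--     return suffixes(tuple(counts.values()))
-- ===== Notes on version B (the rewrite author's own statement) =====
-- stated objective: faster
-- what changed: A recomputes the suffix-permutation set of the same remaining-letter multiset along every branch of its recursion; B memoizes: a dict keyed by the remaining-count tuple stores each sub-multiset's suffix-permutation set, so every distinct subproblem is computed once and reused (top-down dynamic programming over count vectors).
import Mathlib
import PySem

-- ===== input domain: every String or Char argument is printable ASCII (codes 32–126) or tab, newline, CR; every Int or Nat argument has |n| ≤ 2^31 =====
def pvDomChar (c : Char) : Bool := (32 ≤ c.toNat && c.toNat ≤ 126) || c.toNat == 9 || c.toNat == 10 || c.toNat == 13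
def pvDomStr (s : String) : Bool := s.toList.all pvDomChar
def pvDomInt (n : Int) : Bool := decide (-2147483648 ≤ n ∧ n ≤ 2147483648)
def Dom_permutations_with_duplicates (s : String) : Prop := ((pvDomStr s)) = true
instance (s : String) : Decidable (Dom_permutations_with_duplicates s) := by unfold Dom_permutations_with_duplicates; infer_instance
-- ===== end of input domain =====

-- B memoizes A's recurrence: a dict keyed by the remaining-count tuple stores each
-- sub-multiset's suffix-permutation set, so every distinct subproblem is computed once and
-- reused instead of being recomputed along every branch of A's recursion.

-- ===== PORT A =====
-- Counter(s): insertion-ordered dict char → count, first-occurrence order.  Counts are modeled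
-- as Nat: every count Python ever stores here is nonnegative (Counter(s), then -1 only when ≠ 0).
def pvCounter (cs : List Char) : List (Char × Nat) :=
  cs.foldl (fun acc c =>
    if acc.any (fun p => p.1 == c)
    then acc.map (fun p => if p.1 == c then (p.1, p.2 + 1) else p)
    else acc ++ [(c, 1)]) []

-- 'not (s_counter - Counter())': with nonnegative counts, the Counter is empty iff the total is 0
def pvTotal (cnt : List (Char × Nat)) : Nat := (cnt.map Prod.snd).sum

-- next_counter = s_counter.copy(); next_counter[char] -= 1   (dict keys are unique)
def pvNext (cnt : List (Char × Nat)) (c : Char) : List (Char × Nat) :=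
  cnt.map (fun p => if p.1 == c then (p.1, p.2 - 1) else p)

-- permutation_helper; strings are handled as List Char (PySem.Chars level), rebuilt at the end.
-- The recursion depth is bounded by the total count, so a fuel of pvTotal + 1 makes the
-- recursion structural; the loop over s_counter.keys() reads each key's count from its own item.
def pvHelperF (fuel : Nat) (cnt : List (Char × Nat)) : PySem.Set (List Char) :=
  if pvTotal cnt = 0 then PySem.Set.ofList [[]]
  else match fuel with
    | 0 => PySem.Set.empty
    | fuel + 1 =>
      cnt.foldl (fun perms p =>
        if p.2 = 0 then perms
        else (pvHelperF fuel (pvNext cnt p.1)).foldl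
          (fun ps q => PySem.Set.add ps (p.1 :: q)) perms)
        PySem.Set.empty

def permutations_with_duplicates (s : String) : List String :=
  (pvHelperF (pvTotal (pvCounter s.toList) + 1) (pvCounter s.toList)).map String.ofList

-- ===== PORT B =====
-- Counter(s) is ported by the shared pvCounter (both Pythons call Counter(s)); chars =
-- list(counts), the initial key = tuple(counts.values()).  The memo dict maps remaining-count
-- tuples to the set of suffix permutations of that sub-multiset.  The recursion depth is
-- bounded by sum(key), so a fuel of sum + 1 makes the recursion structural; key[i] is
-- PySem.List.pyGetD, the slices key[:i] / key[i+1:] are PySem.List.slice.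
def pvSuffixes (fuel : Nat) (chars : List Char) (key : List Nat)
    (memo : PySem.Dict (List Nat) (PySem.Set (List Char))) :
    PySem.Set (List Char) × PySem.Dict (List Nat) (PySem.Set (List Char)) :=
  match memo.get? key with
  | some v => (v, memo)
  | none =>
    let r :=
      if key.sum = 0 then (PySem.Set.add PySem.Set.empty [], memo)
      else match fuel with
        | 0 => (PySem.Set.empty, memo)
        | fuel + 1 =>
          (PySem.List.enumerate chars).foldl (fun acc ci =>
            if PySem.List.pyGetD key ci.1 0 ≠ 0 then
              let rest := PySem.List.slice key none (some ci.1) ++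
                [PySem.List.pyGetD key ci.1 0 - 1] ++
                PySem.List.slice key (some (ci.1 + 1)) none
              let sub := pvSuffixes fuel chars rest acc.2
              (sub.1.foldl (fun ps p => PySem.Set.add ps (ci.2 :: p)) acc.1, sub.2)
            else acc)
            (PySem.Set.empty, memo)
    (r.1, r.2.insert key r.1)

def permutations_with_duplicates_alt (s : String) : List String :=
  ((pvSuffixes (pvTotal (pvCounter s.toList) + 1) ((pvCounter s.toList).map Prod.fst)
      ((pvCounter s.toList).map Prod.snd) PySem.Dict.empty).1).map String.ofList

-- ===== PRECONDITION & SPEC =====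
def Spec_permutations_with_duplicates (s : String) (out : List String) : Prop := out = permutations_with_duplicates_alt s
instance (s : String) (out : List String) : Decidable (Spec_permutations_with_duplicates s out) := by unfold Spec_permutations_with_duplicates; infer_instance

-- ===== CLAIM (what is proved, stated in full; the proofs are below) =====
def Claim_equal_permutations_with_duplicates : Prop := ∀ (s : String), Dom_permutations_with_duplicates s → Spec_permutations_with_duplicates s (permutations_with_duplicates s)

-- ===== LEMMAS AND PROOFS =====

-- the common spec: the distinct permutations enumerated depth-first in first-occurrence key order
def pvGenF (fuel : Nat) (cnt : List (Char × Nat)) : List (List Char) :=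
  if pvTotal cnt = 0 then [[]]
  else match fuel with
    | 0 => []
    | fuel + 1 =>
      cnt.flatMap (fun p => if p.2 = 0 then [] else (pvGenF fuel (pvNext cnt p.1)).map (p.1 :: ·))

def pvGen (cnt : List (Char × Nat)) : List (List Char) := pvGenF (pvTotal cnt + 1) cnt

lemma pvNext_snd (cnt : List (Char × Nat)) (c : Char) :
    (pvNext cnt c).map Prod.snd = cnt.map (fun p => if p.1 == c then p.2 - 1 else p.2) := by
  simp only [pvNext, List.map_map]
  refine List.map_congr_left (fun p _ => ?_)
  rcases p with ⟨a, b⟩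
  by_cases h : a = c <;> simp [h]

lemma pvTotal_pvNext_lt (cnt : List (Char × Nat)) (c : Char) (k : Nat)
    (hm : (c, k) ∈ cnt) (hk : k ≠ 0) : pvTotal (pvNext cnt c) < pvTotal cnt := by
  unfold pvTotal
  rw [pvNext_snd]
  refine List.sum_lt_sum _ _ (fun p _ => by split <;> omega) ⟨(c, k), hm, ?_⟩
  simp; omega

lemma pvGenF_irrel (f1 : Nat) : ∀ (f2 : Nat) (cnt : List (Char × Nat)),
    pvTotal cnt < f1 → pvTotal cnt < f2 → pvGenF f1 cnt = pvGenF f2 cnt := by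
  induction f1 with
  | zero => intro f2 cnt h1 _; omega
  | succ f1 ih =>
    intro f2 cnt h1 h2
    match f2 with
    | 0 => omega
    | f2 + 1 =>
      by_cases h0 : pvTotal cnt = 0
      · simp [pvGenF, h0]
      · simp only [pvGenF, h0, if_false]
        refine List.flatMap_congr (fun p hp => ?_)
        by_cases hz : p.2 = 0
        · simp [hz]
        · have hlt : pvTotal (pvNext cnt p.1) < pvTotal cnt :=
            pvTotal_pvNext_lt cnt p.1 p.2 (by simpa using hp) hz
          simp only [hz, if_false]
          rw [ih f2 (pvNext cnt p.1) (by omega) (by omega)]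

lemma pvGen_zero (cnt : List (Char × Nat)) (h : pvTotal cnt = 0) : pvGen cnt = [[]] := by
  simp [pvGen, pvGenF, h]

lemma pvGen_rows (cnt : List (Char × Nat)) (h : pvTotal cnt ≠ 0) :
    pvGen cnt = cnt.flatMap
      (fun p => if p.2 = 0 then [] else (pvGen (pvNext cnt p.1)).map (p.1 :: ·)) := by
  conv_lhs => rw [pvGen, pvGenF]
  simp only [h, if_false]
  refine List.flatMap_congr (fun p hp => ?_)
  by_cases hz : p.2 = 0
  · simp [hz]
  · have hlt : pvTotal (pvNext cnt p.1) < pvTotal cnt :=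
      pvTotal_pvNext_lt cnt p.1 p.2 (by simpa using hp) hz
    simp only [hz, if_false]
    rw [pvGenF_irrel (pvTotal cnt) (pvTotal (pvNext cnt p.1) + 1) (pvNext cnt p.1)
      (by omega) (by omega)]
    rfl

-- adding the cons-image of a deduplicated list adds the same elements as the raw cons-image
lemma update_map_cons_ofList (s : PySem.Set (List Char)) (M : List (List Char)) (c : Char) :
    PySem.Set.update s ((PySem.Set.ofList M).map (c :: ·)) =
      PySem.Set.update s (M.map (c :: ·)) := by
  induction M using List.reverseRecOn with
  | nil => rfl
  | append_singleton M x ih =>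
    rw [PySem.Set.ofList_append_singleton]
    by_cases hx : x ∈ PySem.Set.ofList M
    · rw [PySem.Set.add_of_mem hx, List.map_append, PySem.Set.update_append, ih]
      have hmem : (c :: x) ∈ PySem.Set.update s (M.map (c :: ·)) := by
        rw [PySem.Set.mem_update]
        right
        exact List.mem_map_of_mem (by rwa [PySem.Set.mem_ofList] at hx)
      simp [PySem.Set.update_cons, PySem.Set.update_nil, PySem.Set.add_of_mem hmem]
    · rw [PySem.Set.add_of_not_mem hx, List.map_append, List.map_append,
        PySem.Set.update_append, PySem.Set.update_append, ih]

-- ===== A characterization =====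
lemma pvHelperF_eq : ∀ (fuel : Nat) (cnt : List (Char × Nat)), pvTotal cnt < fuel →
    pvHelperF fuel cnt = PySem.Set.ofList (pvGen cnt) := by
  intro fuel
  induction fuel with
  | zero => intro cnt h; omega
  | succ f ih =>
    intro cnt h
    by_cases h0 : pvTotal cnt = 0
    · rw [pvGen_zero cnt h0]
      simp [pvHelperF, h0]
    · have haux : ∀ (l : List (Char × Nat)), (∀ p ∈ l, p ∈ cnt) →
          ∀ s : PySem.Set (List Char),
          l.foldl (fun perms p => if p.2 = 0 then perms
            else (pvHelperF f (pvNext cnt p.1)).foldl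
              (fun ps q => PySem.Set.add ps (p.1 :: q)) perms) s
          = PySem.Set.update s (l.flatMap (fun p => if p.2 = 0 then []
              else (pvGen (pvNext cnt p.1)).map (p.1 :: ·))) := by
        intro l
        induction l with
        | nil => intro _ s; simp [PySem.Set.update_nil]
        | cons p l ihl =>
          intro hmem s
          simp only [List.foldl_cons, List.flatMap_cons]
          by_cases hz : p.2 = 0
          · rw [if_pos hz, if_pos hz, ihl (fun q hq => hmem q (List.mem_cons_of_mem _ hq))]
            simp
          · rw [if_neg hz, if_neg hz]
            have hrec : pvHelperF f (pvNext cnt p.1)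
                = PySem.Set.ofList (pvGen (pvNext cnt p.1)) := by
              apply ih
              have := pvTotal_pvNext_lt cnt p.1 p.2
                (by simpa using hmem p List.mem_cons_self) hz
              omega
            rw [hrec, ← PySem.Set.update_map_eq_foldl_add, update_map_cons_ofList,
              ihl (fun q hq => hmem q (List.mem_cons_of_mem _ hq)), PySem.Set.update_append]
      conv_lhs => rw [pvHelperF]
      simp only [h0, if_false]
      rw [haux cnt (fun _ hp => hp) PySem.Set.empty, pvGen_rows cnt h0]
      exact PySem.Set.update_nil_left _

-- ===== keys lemmas =====
lemma pvCounter_keys_nodup (cs : List Char) : ((pvCounter cs).map Prod.fst).Nodup := by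
  suffices h : ∀ (l : List Char) (acc : List (Char × Nat)), (acc.map Prod.fst).Nodup →
      ((l.foldl (fun acc c =>
        if acc.any (fun p => p.1 == c)
        then acc.map (fun p => if p.1 == c then (p.1, p.2 + 1) else p)
        else acc ++ [(c, 1)]) acc).map Prod.fst).Nodup by
    exact h cs [] (by simp)
  intro l
  induction l with
  | nil => intro acc h; simpa using h
  | cons c l ihl =>
    intro acc h
    simp only [List.foldl_cons]
    by_cases hc : acc.any (fun p => p.1 == c)
    · rw [if_pos hc]
      apply ihl
      have : (acc.map (fun p => if p.1 == c then (p.1, p.2 + 1) else p)).map Prod.fst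
          = acc.map Prod.fst := by
        simp only [List.map_map]
        refine List.map_congr_left (fun p _ => ?_)
        rcases p with ⟨a, b⟩
        by_cases hh : a = c <;> simp [hh]
      rwa [this]
    · rw [if_neg hc]
      apply ihl
      have hnc : c ∉ acc.map Prod.fst := by
        simp only [List.any_eq_true, beq_iff_eq, not_exists, not_and] at hc
        simp only [List.mem_map, not_exists, not_and]
        intro p hp he
        exact hc p hp he
      rw [List.map_append]
      simp only [List.nodup_append, h, true_and]
      refine ⟨List.nodup_singleton _, fun a hb b hm => ?_⟩
      simp only [List.map_cons, List.map_nil, List.mem_cons, List.not_mem_nil, or_false] at hm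
      subst hm
      rintro rfl
      exact hnc hb

lemma set_eq_pvNext (cnt : List (Char × Nat)) (i : Nat) (c : Char) (k : Nat)
    (hn : (cnt.map Prod.fst).Nodup) (hi : cnt[i]? = some (c, k)) :
    cnt.set i (c, k - 1) = pvNext cnt c := by
  induction cnt generalizing i with
  | nil => simp at hi
  | cons p t ih =>
    rcases p with ⟨a, b⟩
    simp only [List.map_cons, List.nodup_cons] at hn
    cases i with
    | zero =>
      simp only [List.getElem?_cons_zero, Option.some_inj, Prod.ext_iff] at hi
      obtain ⟨rfl, rfl⟩ := hi
      have htail : t.map (fun p => if p.1 = a then (p.1, p.2 - 1) else p) = t := by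
        have hq : ∀ q ∈ t, (if q.1 = a then (q.1, q.2 - 1) else q) = id q := by
          intro q hq
          have hqa : q.1 ≠ a := by
            intro he
            exact hn.1 (by simpa [← he] using List.mem_map_of_mem (f := Prod.fst) hq)
          simp [hqa]
        rw [List.map_congr_left hq, List.map_id]
      simp [List.set_cons_zero, pvNext, List.map_cons]
      exact htail.symm
    | succ j =>
      simp only [List.getElem?_cons_succ] at hi
      have hct : c ∈ t.map Prod.fst := by
        have : (c, k) ∈ t := List.mem_of_getElem? hi
        simpa using List.mem_map_of_mem (f := Prod.fst) this
      have hac : ¬(a == c) = true := by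
        simp only [beq_iff_eq]
        rintro rfl
        exact hn.1 hct
      simp only [List.set_cons_succ, pvNext, List.map_cons, hac]
      exact congrArg _ (ih j hn.2 hi)

-- ===== B characterization =====
def pvMemoOK (chars : List Char) (memo : PySem.Dict (List Nat) (PySem.Set (List Char))) : Prop :=
  ∀ k v, memo.get? k = some v → v = PySem.Set.ofList (pvGen (chars.zip k))

lemma pvMemoOK_empty (chars : List Char) : pvMemoOK chars PySem.Dict.empty := by
  intro k v h
  simp [PySem.Dict.get?, PySem.Dict.empty] at h

lemma pvMemoOK_insert (chars : List Char) (memo : PySem.Dict (List Nat) (PySem.Set (List Char)))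
    (k : List Nat) (v : PySem.Set (List Char)) (hm : pvMemoOK chars memo)
    (hv : v = PySem.Set.ofList (pvGen (chars.zip k))) : pvMemoOK chars (memo.insert k v) := by
  intro k' v' h'
  by_cases hk : k' = k
  · subst hk
    rw [PySem.Dict.get?_insert_self] at h'
    cases h'
    exact hv
  · rw [PySem.Dict.get?_insert_of_ne _ _ hk] at h'
    exact hm k' v' h'

lemma pvZipDrop (l1 : List Char) (l2 : List Nat) (n : Nat) :
    (l1.zip l2).drop n = (l1.drop n).zip (l2.drop n) := by
  induction l1 generalizing l2 n with
  | nil => simp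
  | cons a t ih =>
    cases l2 with
    | nil => simp
    | cons b u =>
      cases n with
      | zero => simp
      | succ m => simpa using ih u m

lemma pvZipSet (l1 : List Char) (l2 : List Nat) (i : Nat) (c : Char) (v : Nat)
    (hi : i < l1.length) (h : l1[i] = c) :
    l1.zip (l2.set i v) = (l1.zip l2).set i (c, v) := by
  induction l1 generalizing l2 i with
  | nil => simp at hi
  | cons a t ih =>
    cases l2 with
    | nil => simp
    | cons b u =>
      cases i with
      | zero => simp_all
      | succ j =>
        simp only [List.set_cons_succ, List.zip_cons_cons]
        rw [ih u j (by simpa using hi) (by simpa using h)]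

lemma pvTakeDropSet (l : List Nat) (i : Nat) (a : Nat) (h : i < l.length) :
    l.take i ++ [a] ++ l.drop (i + 1) = l.set i a := by
  rw [List.set_eq_take_append_cons_drop, if_pos h]
  simp

lemma pvSumSet (key : List Nat) (j : Nat) (hj : j < key.length) (hk : key[j] ≠ 0) :
    (key.set j (key[j] - 1)).sum + 1 = key.sum := by
  induction key generalizing j with
  | nil => simp at hj
  | cons b u ih =>
    cases j with
    | zero => simp at hk ⊢; omega
    | succ m =>
      have := ih m (by simpa using hj) (by simpa using hk)
      simp only [List.set_cons_succ, List.sum_cons, List.getElem_cons_succ] at *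
      omega

lemma pvSuffixes_eq : ∀ (fuel : Nat) (chars : List Char) (key : List Nat)
    (memo : PySem.Dict (List Nat) (PySem.Set (List Char))),
    key.sum < fuel → key.length = chars.length → chars.Nodup → pvMemoOK chars memo →
    (pvSuffixes fuel chars key memo).1 = PySem.Set.ofList (pvGen (chars.zip key)) ∧
      pvMemoOK chars (pvSuffixes fuel chars key memo).2 := by
  intro fuel
  induction fuel with
  | zero => intro _ key _ h _ _ _; omega
  | succ f ih =>
    intro chars key memo hf hlen hnd hm
    have hfst : (chars.zip key).map Prod.fst = chars := List.map_fst_zip (by omega)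
    have hsnd : (chars.zip key).map Prod.snd = key := List.map_snd_zip (by omega)
    have htot : pvTotal (chars.zip key) = key.sum := by rw [pvTotal, hsnd]
    cases hget : memo.get? key with
    | some v =>
      refine ⟨?_, ?_⟩ <;> simp only [pvSuffixes, hget]
      · exact hm key v hget
      · exact hm
    | none =>
      by_cases hz : key.sum = 0
      · have hg : pvGen (chars.zip key) = [[]] := pvGen_zero _ (by omega)
        have hval : (PySem.Set.add PySem.Set.empty ([] : List Char))
            = PySem.Set.ofList (pvGen (chars.zip key)) := by rw [hg]; rfl
        refine ⟨?_, ?_⟩ <;> simp only [pvSuffixes, hget, hz, if_pos]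
        · exact hval
        · exact pvMemoOK_insert chars memo key _ hm hval
      · have haux : ∀ (suf : List Char) (j : Nat), chars.drop j = suf →
            ∀ st : PySem.Set (List Char) × PySem.Dict (List Nat) (PySem.Set (List Char)),
            pvMemoOK chars st.2 →
            (List.foldl
              (fun acc ci =>
                if PySem.List.pyGetD key ci.1 0 ≠ 0 then
                  (List.foldl (fun ps p => ps.add (ci.2 :: p)) acc.1
                      (pvSuffixes f chars
                          (PySem.List.slice key none (some ci.1) ++
                            [PySem.List.pyGetD key ci.1 0 - 1] ++
                            PySem.List.slice key (some (ci.1 + 1)) none)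
                          acc.2).1,
                    (pvSuffixes f chars
                        (PySem.List.slice key none (some ci.1) ++
                          [PySem.List.pyGetD key ci.1 0 - 1] ++
                          PySem.List.slice key (some (ci.1 + 1)) none)
                        acc.2).2)
                else acc)
              st (PySem.List.enumerate suf (j : Int))).1
              = PySem.Set.update st.1 (((chars.zip key).drop j).flatMap
                  (fun p => if p.2 = 0 then []
                    else (pvGen (pvNext (chars.zip key) p.1)).map (p.1 :: ·)))
            ∧ pvMemoOK chars (List.foldl
              (fun acc ci =>
                if PySem.List.pyGetD key ci.1 0 ≠ 0 then
                  (List.foldl (fun ps p => ps.add (ci.2 :: p)) acc.1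
                      (pvSuffixes f chars
                          (PySem.List.slice key none (some ci.1) ++
                            [PySem.List.pyGetD key ci.1 0 - 1] ++
                            PySem.List.slice key (some (ci.1 + 1)) none)
                          acc.2).1,
                    (pvSuffixes f chars
                        (PySem.List.slice key none (some ci.1) ++
                          [PySem.List.pyGetD key ci.1 0 - 1] ++
                          PySem.List.slice key (some (ci.1 + 1)) none)
                        acc.2).2)
                else acc)
              st (PySem.List.enumerate suf (j : Int))).2 := by
          intro suf
          induction suf with
          | nil =>
            intro j hd st hst
            have hdz : (chars.zip key).drop j = [] := by
              rw [pvZipDrop, hd]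
              simp
            simp only [PySem.List.enumerate_nil, List.foldl_nil, hdz, List.flatMap_nil,
              PySem.Set.update_nil]
            exact ⟨trivial, hst⟩
          | cons c suf ihs =>
            intro j hd st hst
            have hj : j < chars.length := by
              by_contra hle
              rw [List.drop_eq_nil_of_le (by omega)] at hd
              simp at hd
            rw [List.drop_eq_getElem_cons hj] at hd
            injection hd with hcj hdsuf
            have hjk : j < key.length := by omega
            have hkeyj : PySem.List.pyGetD key ((j : Nat) : Int) 0 = key[j] := by
              rw [PySem.List.pyGetD_natCast]
              exact List.getD_eq_getElem key 0 hjk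
            have hzj : (chars.zip key).drop j = (c, key[j]) :: (chars.zip key).drop (j + 1) := by
              rw [List.drop_eq_getElem_cons (by rw [List.length_zip]; omega)]
              congr 1
              rw [List.getElem_zip]
              simp [hcj]
            have hcast : ((j : Int) + 1) = (((j + 1 : Nat)) : Int) := by push_cast; ring
            rw [PySem.List.enumerate_cons, List.foldl_cons, hcast]
            simp only [hkeyj]
            by_cases hkz : key[j] = 0
            · rw [if_neg (by omega)]
              obtain ⟨ha, hb⟩ := ihs (j + 1) hdsuf st hst
              refine ⟨?_, hb⟩
              rw [ha, hzj, List.flatMap_cons, if_pos hkz, List.nil_append]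
            · -- the decremented key is key.set j (key[j] - 1)
              have hrest : PySem.List.slice key none (some ((j : Nat) : Int)) ++ [key[j] - 1] ++
                  PySem.List.slice key (some (((j + 1 : Nat)) : Int)) none
                  = key.set j (key[j] - 1) := by
                rw [PySem.List.slice_to_natCast, PySem.List.slice_from_natCast]
                exact pvTakeDropSet key j _ hjk
              rw [if_pos hkz, hrest]
              have hzrn : chars.zip (key.set j (key[j] - 1)) = pvNext (chars.zip key) c := by
                rw [pvZipSet chars key j c _ hj hcj]
                refine set_eq_pvNext _ j c key[j] (by rw [hfst]; exact hnd) ?_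
                rw [List.getElem?_eq_getElem (by rw [List.length_zip]; omega)]
                rw [List.getElem_zip]
                simp [hcj]
              obtain ⟨hs1, hs2⟩ := ih chars (key.set j (key[j] - 1)) st.2
                (by have := pvSumSet key j hjk hkz; omega)
                (by rw [List.length_set]; exact hlen) hnd hst
              rw [hzrn] at hs1
              rw [hs1, ← PySem.Set.update_map_eq_foldl_add, update_map_cons_ofList]
              obtain ⟨ha2, hb2⟩ := ihs (j + 1) hdsuf
                (PySem.Set.update st.1 ((pvGen (pvNext (chars.zip key) c)).map (c :: ·)),
                  (pvSuffixes f chars (key.set j (key[j] - 1)) st.2).2) hs2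
              refine ⟨?_, hb2⟩
              rw [ha2, hzj, List.flatMap_cons, if_neg hkz, PySem.Set.update_append]
        obtain ⟨ha, hb⟩ := haux chars 0 List.drop_zero (PySem.Set.empty, memo) hm
        refine ⟨?_, ?_⟩ <;> simp only [pvSuffixes, hget]
        · rw [if_neg hz]
          rw [show ((0 : Nat) : Int) = (0 : Int) from rfl] at ha
          rw [ha]
          rw [List.drop_zero, pvGen_rows (chars.zip key) (by omega)]
          exact PySem.Set.update_nil_left _
        · rw [if_neg hz]
          refine pvMemoOK_insert chars _ key _ hb ?_
          rw [show ((0 : Nat) : Int) = (0 : Int) from rfl] at ha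
          rw [ha, List.drop_zero, pvGen_rows (chars.zip key) (by omega)]
          exact PySem.Set.update_nil_left _

-- ===== VERDICT (by name: the statement is the Claim_ definition above) =====
theorem permutations_with_duplicates_spec : Claim_equal_permutations_with_duplicates := by
  intro s _
  unfold Spec_permutations_with_duplicates permutations_with_duplicates
    permutations_with_duplicates_alt
  have hnd := pvCounter_keys_nodup s.toList
  have hzip : ((pvCounter s.toList).map Prod.fst).zip ((pvCounter s.toList).map Prod.snd)
      = pvCounter s.toList := (List.zip_of_prod rfl rfl).symm
  have hlen : ((pvCounter s.toList).map Prod.snd).length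
      = ((pvCounter s.toList).map Prod.fst).length := by simp
  have hsum : ((pvCounter s.toList).map Prod.snd).sum = pvTotal (pvCounter s.toList) := rfl
  obtain ⟨h1, _⟩ := pvSuffixes_eq (pvTotal (pvCounter s.toList) + 1)
    ((pvCounter s.toList).map Prod.fst) ((pvCounter s.toList).map Prod.snd) PySem.Dict.empty
    (by omega) hlen hnd (pvMemoOK_empty _)
  rw [h1, hzip, pvHelperF_eq (pvTotal (pvCounter s.toList) + 1) (pvCounter s.toList) (by omega)]
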